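-- pv_equiv track=rewrite | github.com/GrzegorzSzczepanek/bch-encoder-decoder | api/bch/bch_terminal_implementation.py | compute_syndromes
-- ===== SOURCE A (Python) =====
-- def gf16_add(a, b):
--     """
--     Addition in GF(16), which is just XOR.
--
--     Args:
--         a (int): First element.
--         b (int): Second element.
--
--     Returns:
--         int: Result of addition.
--     """
--     return a ^ b
--
-- def compute_syndromes(codeword_bits, exp_table, log_table):
--     """
--     Compute syndromes for error detection.
--
--     Args:
--         codeword_bits (list): List of bits in the codeword.
--         exp_table (list): Exponentiation table.
--         log_table (list): Logarithm table.
--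
--     Returns:
--         list: List of syndromes S1 to S4.
--     """
--     syndromes = []
--     n = len(codeword_bits)
--     for i in range(1, 5):
--         s = 0
--         for j in range(n):
--             if codeword_bits[j]:
--                 exponent = (i * j) % 15
--                 s = gf16_add(s, exp_table[exponent])
--         syndromes.append(s)
--     return syndromes
-- ===== SOURCE B (Python) =====
-- def compute_syndromes(codeword_bits, exp_table, log_table):
--     """Single pass over the codeword maintaining four running syndromes."""
--     s1 = s2 = s3 = s4 = 0
--     for j, bit in enumerate(codeword_bits):
--         if bit:
--             s1 ^= exp_table[j % 15]
--             s2 ^= exp_table[(2 * j) % 15]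
--             s3 ^= exp_table[(3 * j) % 15]
--             s4 ^= exp_table[(4 * j) % 15]
--     return [s1, s2, s3, s4]
-- ===== Notes on version B (the rewrite author's own statement) =====
-- stated objective: faster
-- what changed: Replaces A's four separate scans of the codeword (outer loop over i=1..4, inner index loop) by one single pass over enumerate(codeword_bits) maintaining four explicit XOR accumulators s1..s4, removing repeated traversal and indexing overhead.
import Mathlib
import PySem

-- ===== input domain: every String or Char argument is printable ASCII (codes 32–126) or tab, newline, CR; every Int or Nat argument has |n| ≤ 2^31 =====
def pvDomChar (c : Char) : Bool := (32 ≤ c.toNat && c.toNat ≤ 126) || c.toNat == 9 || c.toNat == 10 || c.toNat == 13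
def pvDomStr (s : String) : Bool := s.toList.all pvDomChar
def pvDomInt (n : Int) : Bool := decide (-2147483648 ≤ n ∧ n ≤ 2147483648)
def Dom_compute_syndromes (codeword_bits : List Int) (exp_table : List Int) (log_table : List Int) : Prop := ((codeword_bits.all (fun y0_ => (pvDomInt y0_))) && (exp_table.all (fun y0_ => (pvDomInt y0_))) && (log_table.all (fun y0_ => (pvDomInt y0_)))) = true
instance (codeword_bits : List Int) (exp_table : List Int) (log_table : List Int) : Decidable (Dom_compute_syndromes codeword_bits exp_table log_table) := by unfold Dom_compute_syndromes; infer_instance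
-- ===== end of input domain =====

-- B folds the codeword once with four running XOR accumulators instead of A's four scans; equal return values proved on all inputs where A returns.

-- ===== PORT A =====
def gf16_add (a b : Int) : Int := PySem.Int.bxor a b

def compute_syndromes (codeword_bits : List Int) (exp_table : List Int) (log_table : List Int) : List Int :=
  let n : Int := codeword_bits.length
  (PySem.List.pyRange 1 5 1).foldl (fun syndromes i =>
    syndromes ++ [(PySem.List.pyRange 0 n 1).foldl (fun s j =>
      if PySem.List.pyGetD codeword_bits j 0 ≠ 0 then
        gf16_add s (PySem.List.pyGetD exp_table (PySem.Int.mod (i * j) 15) 0)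
      else s) 0]) []

-- ===== PORT B =====
def compute_syndromes_alt (codeword_bits : List Int) (exp_table : List Int) (log_table : List Int) : List Int :=
  let r := (PySem.List.enumerate codeword_bits 0).foldl
    (fun (acc : Int × Int × Int × Int) jb =>
      if jb.2 ≠ 0 then
        (PySem.Int.bxor acc.1 (PySem.List.pyGetD exp_table (PySem.Int.mod jb.1 15) 0),
         PySem.Int.bxor acc.2.1 (PySem.List.pyGetD exp_table (PySem.Int.mod (2 * jb.1) 15) 0),
         PySem.Int.bxor acc.2.2.1 (PySem.List.pyGetD exp_table (PySem.Int.mod (3 * jb.1) 15) 0),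
         PySem.Int.bxor acc.2.2.2 (PySem.List.pyGetD exp_table (PySem.Int.mod (4 * jb.1) 15) 0))
      else acc) (0, 0, 0, 0)
  [r.1, r.2.1, r.2.2.1, r.2.2.2]

-- ===== PRECONDITION & SPEC =====
-- Pre_ excludes exactly the inputs where Python A raises IndexError: some truthy bit at index j with (i*j)%15 out of range of exp_table (B raises there too).
def Pre_compute_syndromes (codeword_bits : List Int) (exp_table : List Int) (log_table : List Int) : Prop :=
  ∀ p ∈ codeword_bits.zipIdx, p.1 ≠ 0 → ∀ i ∈ ([1, 2, 3, 4] : List Int),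
    (PySem.Int.mod (i * (p.2 : Int)) 15).toNat < exp_table.length
instance (codeword_bits : List Int) (exp_table : List Int) (log_table : List Int) : Decidable (Pre_compute_syndromes codeword_bits exp_table log_table) := by unfold Pre_compute_syndromes; infer_instance

def pvWitness_compute_syndromes : List Int × List Int × List Int :=
  ([1, 0, 1, 1], [1, 2, 4, 8, 3, 6, 12, 11, 5, 10, 7, 14, 15, 13, 9], [0, 0, 0, 0])

def Spec_compute_syndromes (codeword_bits : List Int) (exp_table : List Int) (log_table : List Int) (out : List Int) : Prop := out = compute_syndromes_alt codeword_bits exp_table log_table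
instance (codeword_bits : List Int) (exp_table : List Int) (log_table : List Int) (out : List Int) : Decidable (Spec_compute_syndromes codeword_bits exp_table log_table out) := by unfold Spec_compute_syndromes; infer_instance

-- ===== CLAIM (what is proved, stated in full; the proofs are below) =====
def Claim_equal_compute_syndromes : Prop := ∀ (codeword_bits : List Int) (exp_table : List Int) (log_table : List Int), Dom_compute_syndromes codeword_bits exp_table log_table → Pre_compute_syndromes codeword_bits exp_table log_table → Spec_compute_syndromes codeword_bits exp_table log_table (compute_syndromes codeword_bits exp_table log_table)

-- ===== LEMMAS AND PROOFS =====

-- common shape: one syndrome accumulated along the codeword starting at index k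
def pvLoop (i : Int) (et : List Int) : List Int → Int → Int → Int
  | [], _, s => s
  | b :: rest, k, s =>
      pvLoop i et rest (k + 1)
        (if b ≠ 0 then gf16_add s (PySem.List.pyGetD et (PySem.Int.mod (i * k) 15) 0) else s)

lemma A_inner_eq (i : Int) (et : List Int) (cb : List Int) (pre : List Int) (s : Int) :
    (PySem.List.pyRange (pre.length) ((pre ++ cb).length : Int) 1).foldl
      (fun s j => if PySem.List.pyGetD (pre ++ cb) j 0 ≠ 0 then
          gf16_add s (PySem.List.pyGetD et (PySem.Int.mod (i * j) 15) 0) else s) s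
    = pvLoop i et cb (pre.length) s := by
  induction cb generalizing pre s with
  | nil => rw [PySem.List.pyRange_one_eq_nil (by simp)]; rfl
  | cons b rest ih =>
      have hlt : (pre.length : Int) < ((pre ++ b :: rest).length : Int) := by
        simp
      rw [PySem.List.pyRange_one_cons hlt]
      simp only [List.foldl_cons]
      have hget : PySem.List.pyGetD (pre ++ b :: rest) (pre.length : Int) 0 = b := by
        rw [PySem.List.pyGetD_natCast]
        simp
      rw [hget]
      simp only [pvLoop]
      have key := ih (pre ++ [b])
        (if b ≠ 0 then gf16_add s (PySem.List.pyGetD et (PySem.Int.mod (i * pre.length) 15) 0) else s)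
      simp only [List.append_assoc, List.cons_append, List.nil_append, List.length_append,
        List.length_cons, List.length_nil] at key ⊢
      push_cast at key ⊢
      exact key

lemma B_eq (et : List Int) (cb : List Int) (k : Int) (s1 s2 s3 s4 : Int) :
    (PySem.List.enumerate cb k).foldl
      (fun (acc : Int × Int × Int × Int) jb =>
        if jb.2 ≠ 0 then
          (PySem.Int.bxor acc.1 (PySem.List.pyGetD et (PySem.Int.mod jb.1 15) 0),
           PySem.Int.bxor acc.2.1 (PySem.List.pyGetD et (PySem.Int.mod (2 * jb.1) 15) 0),
           PySem.Int.bxor acc.2.2.1 (PySem.List.pyGetD et (PySem.Int.mod (3 * jb.1) 15) 0),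
           PySem.Int.bxor acc.2.2.2 (PySem.List.pyGetD et (PySem.Int.mod (4 * jb.1) 15) 0))
        else acc) (s1, s2, s3, s4)
    = (pvLoop 1 et cb k s1, pvLoop 2 et cb k s2, pvLoop 3 et cb k s3, pvLoop 4 et cb k s4) := by
  induction cb generalizing k s1 s2 s3 s4 with
  | nil => rfl
  | cons b rest ih =>
      rw [PySem.List.enumerate_cons]
      simp only [List.foldl_cons]
      by_cases hb : b ≠ 0
      · rw [if_pos hb]
        rw [ih]
        simp [pvLoop, hb, gf16_add, one_mul]
      · rw [if_neg hb]
        rw [ih]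
        simp [pvLoop, hb]

-- ===== VERDICT (by name: the statement is the Claim_ definition above) =====
theorem compute_syndromes_spec : Claim_equal_compute_syndromes := by
  intro cb et lt _ _
  unfold Spec_compute_syndromes compute_syndromes compute_syndromes_alt
  have hA : ∀ i : Int,
      (PySem.List.pyRange 0 (cb.length : Int) 1).foldl
        (fun s j => if PySem.List.pyGetD cb j 0 ≠ 0 then
            gf16_add s (PySem.List.pyGetD et (PySem.Int.mod (i * j) 15) 0) else s) 0
      = pvLoop i et cb 0 0 := by
    intro i
    have := A_inner_eq i et cb [] 0
    simpa using this
  have hrange : PySem.List.pyRange 1 5 1 = [1, 2, 3, 4] := by decide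
  rw [hrange]
  simp only [List.foldl_cons, List.foldl_nil, List.nil_append]
  rw [B_eq]
  rw [hA 1, hA 2, hA 3, hA 4]
  rfl
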